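-- pv_equiv track=rewrite | github.com/tymyrddin/scripts-modern-ciphers | rsa/rsa_cipher.py | get_text_from_blocks
-- ===== SOURCE A (Python) =====
-- DEFAULT_BLOCK_SIZE = 128  # 128 bytes
--
-- BYTE_SIZE = 256  # One byte has 256 different values.
--
-- def get_text_from_blocks(block_ints, message_length, blocksize=DEFAULT_BLOCK_SIZE):
--     # Converts a list of block integers to the original message string.
--     # The original message length is needed to properly convert the last
--     # block integer.
--     message = []
--     for block_int in block_ints:
--         block_message = []
--         for i in range(blocksize - 1, -1, -1):
--             if len(message) + i < message_length:
--                 # Decode the message string for the 128 (or whatever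
--                 # blocksize is set to) characters from this block integer.
--                 ascii_number = block_int // (BYTE_SIZE**i)
--                 block_int = block_int % (BYTE_SIZE**i)
--                 block_message.insert(0, chr(ascii_number))
--         message.extend(block_message)
--     return "".join(message)
-- ===== SOURCE B (Python) =====
-- DEFAULT_BLOCK_SIZE = 128  # 128 bytes
--
-- BYTE_SIZE = 256  # One byte has 256 different values.
--
-- def get_text_from_blocks(block_ints, message_length, blocksize=DEFAULT_BLOCK_SIZE):
--     # Peel each block's characters from the least significant byte upward,
--     # maintaining a shrinking block integer instead of recomputing powers.
--     message = []
--     for block_int in block_ints: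
--         chars = min(blocksize, message_length - len(message))
--         block_message = []
--         for _ in range(chars):
--             block_int, rem = divmod(block_int, BYTE_SIZE)
--             block_message.append(chr(rem))
--         message.extend(block_message)
--     return "".join(message)
-- ===== Notes on version B (the rewrite author's own statement) =====
-- stated objective: faster
-- what changed: B peels each block's characters from the least significant byte upward with divmod on a shrinking block integer and appends, instead of A's high-to-low positional extraction that recomputes 256**i and divides the full-size block integer at every position with insert(0).
-- outside the precondition, e.g. on get_text_from_blocks([82242], 2, 2): A returns 'BŁ', B returns 'BA'
import Mathlib
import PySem

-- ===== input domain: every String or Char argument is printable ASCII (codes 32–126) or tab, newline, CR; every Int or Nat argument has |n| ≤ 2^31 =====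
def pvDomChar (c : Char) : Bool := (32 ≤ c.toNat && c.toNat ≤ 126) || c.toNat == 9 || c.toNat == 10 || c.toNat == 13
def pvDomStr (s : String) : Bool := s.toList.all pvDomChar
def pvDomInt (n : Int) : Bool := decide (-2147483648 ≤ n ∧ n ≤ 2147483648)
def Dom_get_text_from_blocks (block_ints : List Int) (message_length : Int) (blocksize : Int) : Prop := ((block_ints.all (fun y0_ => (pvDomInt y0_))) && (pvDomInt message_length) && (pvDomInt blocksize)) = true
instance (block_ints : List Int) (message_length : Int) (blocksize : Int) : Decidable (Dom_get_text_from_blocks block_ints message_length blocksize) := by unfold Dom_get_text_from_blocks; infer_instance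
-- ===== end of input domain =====

-- B peels each block's characters least-significant-byte first with divmod on a shrinking
-- integer, instead of A's high-to-low positional extraction via 256**i and insert(0);
-- objective: faster (measured): no 256**i powers, no full-width divisions.


-- ===== PORT A =====
-- inner loop body of A: for i in range(blocksize-1,-1,-1): if len(message)+i < message_length: extract
-- chr(ascii_number) is ported as Char.ofNat ·.toNat — exact for codes in 0..255, which Pre_ guarantees;
-- BYTE_SIZE**i is (256:Int)^i.toNat — exact since every i produced by this range is ≥ 0.
def pvStepA (ml len : Int) (st : List Char × Int) (i : Int) : List Char × Int :=
  if len + i < ml then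
    (PySem.List.insert st.1 0 (Char.ofNat ((PySem.Int.floordiv st.2 ((256 : Int) ^ i.toNat)).toNat)),
     PySem.Int.mod st.2 ((256 : Int) ^ i.toNat))
  else st

-- one iteration of A's outer loop: the block_message list built for one block integer
def pvABlock (ml len bs : Int) (b : Int) : List Char :=
  ((PySem.List.pyRange (bs - 1) (-1) (-1)).foldl (pvStepA ml len) ([], b)).1

def get_text_from_blocks (block_ints : List Int) (message_length : Int) (blocksize : Int) : String :=
  String.ofList (block_ints.foldl
    (fun msg bi => msg ++ pvABlock message_length (msg.length : Int) blocksize bi) [])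

-- ===== PORT B =====
-- block_int, rem = divmod(block_int, 256); block_message.append(chr(rem)) — divisor 256 ≠ 0,
-- so divmod is the floordiv/mod pair; chr as Char.ofNat ·.toNat (rem is always in 0..255 here)
def pvStepB (st : List Char × Int) (_ : Int) : List Char × Int :=
  (st.1 ++ [Char.ofNat (PySem.Int.mod st.2 256).toNat], PySem.Int.floordiv st.2 256)

-- one iteration of B's outer loop: for _ in range(chars): peel one low byte
def pvBBlock (chars : Int) (b : Int) : List Char :=
  ((PySem.List.pyRange 0 chars 1).foldl pvStepB ([], b)).1

def get_text_from_blocks_alt (block_ints : List Int) (message_length : Int) (blocksize : Int) : String :=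
  String.ofList (block_ints.foldl
    (fun msg bi => msg ++ pvBBlock (min blocksize (message_length - (msg.length : Int))) bi) [])

-- ===== PRECONDITION & SPEC =====
-- Pre_ excludes inputs where a block integer is negative or ≥ 256^(its character count): there
-- Python's chr either raises ValueError, or (for a moderately overflowing top digit) A returns
-- characters above 255 — an artefact of decoding a block that is not a valid base-256 encoding,
-- where B's low-byte peeling returns an equally arbitrary other string.
def Pre_get_text_from_blocks (block_ints : List Int) (message_length : Int) (blocksize : Int) : Prop :=
  ∀ k : Nat, k < block_ints.length →
    0 < min blocksize (message_length - (k : Int) * blocksize) →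
    0 ≤ block_ints.getD k 0 ∧
      block_ints.getD k 0 < (256 : Int) ^ (min blocksize (message_length - (k : Int) * blocksize)).toNat
instance (block_ints : List Int) (message_length : Int) (blocksize : Int) : Decidable (Pre_get_text_from_blocks block_ints message_length blocksize) := by unfold Pre_get_text_from_blocks; infer_instance

def pvWitness_get_text_from_blocks : List Int × Int × Int := ([16706, 67], 3, 2)

def Spec_get_text_from_blocks (block_ints : List Int) (message_length : Int) (blocksize : Int) (out : String) : Prop := out = get_text_from_blocks_alt block_ints message_length blocksize
instance (block_ints : List Int) (message_length : Int) (blocksize : Int) (out : String) : Decidable (Spec_get_text_from_blocks block_ints message_length blocksize out) := by unfold Spec_get_text_from_blocks; infer_instance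

-- ===== CLAIM (what is proved, stated in full; the proofs are below) =====
def Claim_equal_get_text_from_blocks : Prop := ∀ (block_ints : List Int) (message_length : Int) (blocksize : Int), Dom_get_text_from_blocks block_ints message_length blocksize → Pre_get_text_from_blocks block_ints message_length blocksize → Spec_get_text_from_blocks block_ints message_length blocksize (get_text_from_blocks block_ints message_length blocksize)

-- ===== LEMMAS AND PROOFS =====

-- the canonical value both inner loops compute: n low-to-high base-256 digit characters of b
def pvDigLE (b : Int) : Nat → List Char
  | 0 => []
  | n + 1 => Char.ofNat (PySem.Int.mod b 256).toNat :: pvDigLE (PySem.Int.floordiv b 256) n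

def pvDigLEN (m : Nat) : Nat → List Char
  | 0 => []
  | n + 1 => Char.ofNat (m % 256) :: pvDigLEN (m / 256) n

lemma pvDigLE_length (n : Nat) : ∀ b : Int, (pvDigLE b n).length = n := by
  induction n with
  | zero => intro b; rfl
  | succ n ih => intro b; simp [pvDigLE, ih]

lemma pvDigLE_eq_N (n : Nat) : ∀ b : Int, 0 ≤ b → pvDigLE b n = pvDigLEN b.toNat n := by
  induction n with
  | zero => intro b _; rfl
  | succ n ih =>
    intro b hb
    have hcast : b = ((b.toNat : Nat) : Int) := (Int.toNat_of_nonneg hb).symm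
    have h256 : ((256 : Nat) : Int) = (256 : Int) := by norm_num
    have hmod : PySem.Int.mod b 256 = ((b.toNat % 256 : Nat) : Int) := by
      rw [hcast, ← h256, PySem.Int.mod_natCast]; simp
    have hdiv : PySem.Int.floordiv b 256 = ((b.toNat / 256 : Nat) : Int) := by
      rw [hcast, ← h256, PySem.Int.floordiv_natCast]; simp
    show Char.ofNat (PySem.Int.mod b 256).toNat :: pvDigLE (PySem.Int.floordiv b 256) n =
      Char.ofNat (b.toNat % 256) :: pvDigLEN (b.toNat / 256) n
    rw [hmod, hdiv, ih _ (Int.natCast_nonneg _), Int.toNat_natCast, Int.toNat_natCast]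

lemma pvKeyN (n : Nat) : ∀ m : Nat, m < 256 ^ (n + 1) →
    pvDigLEN m (n + 1) = pvDigLEN (m % 256 ^ n) n ++ [Char.ofNat (m / 256 ^ n)] := by
  induction n with
  | zero =>
    intro m hm
    simp [pvDigLEN, Nat.mod_eq_of_lt (by simpa using hm)]
  | succ n ih =>
    intro m hm
    have hdvd : (256 : Nat) ∣ 256 ^ (n + 1) := dvd_pow_self 256 (Nat.succ_ne_zero n)
    have h1 : m % 256 ^ (n + 1) % 256 = m % 256 := Nat.mod_mod_of_dvd m hdvd
    have h2 : m % 256 ^ (n + 1) / 256 = m / 256 % 256 ^ n := by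
      rw [pow_succ, mul_comm]
      exact Nat.mod_mul_right_div_self m 256 (256 ^ n)
    have h3 : m / 256 ^ (n + 1) = m / 256 / 256 ^ n := by
      rw [Nat.div_div_eq_div_mul, pow_succ, mul_comm]
    have hlt : m / 256 < 256 ^ (n + 1) := by
      rw [Nat.div_lt_iff_lt_mul (by norm_num)]
      calc m < 256 ^ (n + 2) := hm
        _ = 256 ^ (n + 1) * 256 := by ring
    show Char.ofNat (m % 256) :: pvDigLEN (m / 256) (n + 1) = _
    rw [ih (m / 256) hlt]
    simp [pvDigLEN, h1, h2, h3]

lemma pvKey (n : Nat) (b : Int) (hb : 0 ≤ b) (hlt : b < (256 : Int) ^ (n + 1)) :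
    pvDigLE b (n + 1) =
      pvDigLE (PySem.Int.mod b ((256 : Int) ^ n)) n ++
        [Char.ofNat ((PySem.Int.floordiv b ((256 : Int) ^ n)).toNat)] := by
  have hcast : b = ((b.toNat : Nat) : Int) := (Int.toNat_of_nonneg hb).symm
  have hp : ((256 ^ n : Nat) : Int) = (256 : Int) ^ n := by push_cast; ring
  have hmod : PySem.Int.mod b ((256 : Int) ^ n) = ((b.toNat % 256 ^ n : Nat) : Int) := by
    rw [hcast, ← hp, PySem.Int.mod_natCast]; simp
  have hdiv : PySem.Int.floordiv b ((256 : Int) ^ n) = ((b.toNat / 256 ^ n : Nat) : Int) := by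
    rw [hcast, ← hp, PySem.Int.floordiv_natCast]; simp
  have hltN : b.toNat < 256 ^ (n + 1) := by
    have : ((b.toNat : Nat) : Int) < ((256 ^ (n + 1) : Nat) : Int) := by
      rw [← hcast]; push_cast; simpa using hlt
    exact_mod_cast this
  rw [pvDigLE_eq_N _ b hb, hmod, hdiv, pvDigLE_eq_N _ _ (Int.natCast_nonneg _),
    Int.toNat_natCast, Int.toNat_natCast]
  exact pvKeyN n b.toNat hltN

-- B's inner loop: the step ignores the loop variable, so over any list it appends the digits
lemma pvBfold (l : List Int) : ∀ (acc : List Char) (b : Int),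
    (l.foldl pvStepB (acc, b)).1 = acc ++ pvDigLE b l.length := by
  induction l with
  | nil => intro acc b; simp [pvDigLE]
  | cons x t ih =>
    intro acc b
    show (t.foldl pvStepB (pvStepB (acc, b) x)).1 = _
    rw [pvStepB, ih]
    simp [pvDigLE]

lemma pvBBlock_eq (c b : Int) : pvBBlock c b = pvDigLE b c.toNat := by
  unfold pvBBlock
  rw [pvBfold]
  simp [PySem.List.length_pyRange_one]

-- A's inner loop, processing positions a,…,0: extracts exactly min(a+1, min bs (ml-len)) digits
lemma pvAfold (ml len bs : Int) : ∀ (n : Nat) (a : Int), (a + 1).toNat = n → a < bs →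
    ∀ (blk : List Char) (b : Int),
      (0 < min (a + 1) (min bs (ml - len)) →
        0 ≤ b ∧ b < (256 : Int) ^ (min (a + 1) (min bs (ml - len))).toNat) →
      ((PySem.List.pyRange a (-1) (-1)).foldl (pvStepA ml len) (blk, b)).1 =
        pvDigLE b (min (a + 1) (min bs (ml - len))).toNat ++ blk := by
  intro n
  induction n with
  | zero =>
    intro a ha _ blk b _
    have ha' : a ≤ -1 := by omega
    rw [PySem.List.pyRange_neg_one_eq_nil (by omega)]
    have : (min (a + 1) (min bs (ml - len))).toNat = 0 := by omega
    simp [this, pvDigLE]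
  | succ n ih =>
    intro a ha hbs blk b hb
    have ha0 : 0 ≤ a := by omega
    rw [PySem.List.pyRange_neg_one_cons (by omega)]
    simp only [List.foldl_cons]
    by_cases hc : a < min bs (ml - len)
    · -- active position: the digit at 256^a is extracted
      have hcond : len + a < ml := by omega
      have hmin : min (a + 1) (min bs (ml - len)) = a + 1 := by omega
      have hbnd := hb (by omega)
      rw [hmin] at hbnd
      have htn : (a + 1).toNat = a.toNat + 1 := by omega
      rw [htn] at hbnd
      rw [pvStepA, if_pos hcond]
      rw [PySem.List.insert_zero]
      have hP : (0 : Int) < (256 : Int) ^ a.toNat := by positivity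
      have hmin' : min (a - 1 + 1) (min bs (ml - len)) = a := by omega
      rw [ih (a - 1) (by omega) (by omega)]
      · rw [hmin', hmin, htn]
        rw [pvKey a.toNat b hbnd.1 hbnd.2]
        simp
      · rw [hmin']
        intro h0
        exact ⟨PySem.Int.mod_nonneg _ hP, PySem.Int.mod_lt _ hP⟩
    · -- skipped position: a ≥ ml - len (a < bs), the condition is false
      have hcond : ¬ (len + a < ml) := by omega
      rw [pvStepA, if_neg hcond]
      have hmin : min (a + 1) (min bs (ml - len)) = min bs (ml - len) := by omega
      have hmin' : min (a - 1 + 1) (min bs (ml - len)) = min bs (ml - len) := by omega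
      rw [ih (a - 1) (by omega) (by omega)]
      · rw [hmin', hmin]
      · rw [hmin']; intro h0; exact (hmin ▸ hb) (by omega)

lemma pvABlock_eq (ml len bs b : Int)
    (hb : 0 < min bs (ml - len) →
      0 ≤ b ∧ b < (256 : Int) ^ (min bs (ml - len)).toNat) :
    pvABlock ml len bs b = pvDigLE b (min bs (ml - len)).toNat := by
  unfold pvABlock
  have hmin : min (bs - 1 + 1) (min bs (ml - len)) = min bs (ml - len) := by omega
  rw [pvAfold ml len bs (bs - 1 + 1).toNat (bs - 1) rfl (by omega) [] b (by rw [hmin]; exact hb)]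
  rw [hmin]
  simp

-- the outer loops agree block by block
lemma pvOuter (ml bs : Int) : ∀ (l : List Int) (msg : List Char),
    (∀ k : Nat, k < l.length →
      0 < min bs (ml - ((msg.length : Int) + (k : Int) * bs)) →
      0 ≤ l.getD k 0 ∧
        l.getD k 0 < (256 : Int) ^ (min bs (ml - ((msg.length : Int) + (k : Int) * bs))).toNat) →
    l.foldl (fun msg bi => msg ++ pvABlock ml (msg.length : Int) bs bi) msg =
      l.foldl (fun msg bi => msg ++ pvBBlock (min bs (ml - (msg.length : Int))) bi) msg := by
  intro l
  induction l with
  | nil => intro msg _; rfl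
  | cons x t ih =>
    intro msg H
    simp only [List.foldl_cons]
    have h0 := H 0 (by simp) 
    simp only [List.getD_cons_zero, Nat.cast_zero, zero_mul, add_zero] at h0
    rw [pvABlock_eq ml (msg.length : Int) bs x h0, pvBBlock_eq]
    set mI := min bs (ml - (msg.length : Int)) with hmI
    set blk := pvDigLE x mI.toNat with hblk
    have hlen : ((msg ++ blk).length : Int) = (msg.length : Int) + mI.toNat := by
      simp [hblk, pvDigLE_length]
    apply ih
    intro k hk hpos
    have hH := H (k + 1) (by simpa using Nat.succ_lt_succ hk)
    simp only [List.getD_cons_succ] at hH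
    rw [hlen] at hpos ⊢
    have hbs : 0 < bs := lt_of_lt_of_le hpos (min_le_left _ _)
    have hkbs : 0 ≤ (k : Int) * bs := mul_nonneg (Int.natCast_nonneg k) hbs.le
    have h4 : 0 < ml - ((msg.length : Int) + (mI.toNat : Int) + (k : Int) * bs) :=
      lt_of_lt_of_le hpos (min_le_right _ _)
    have h3 : mI ≤ ml - (msg.length : Int) := by rw [hmI]; exact min_le_right _ _
    -- either this block was full (mI = bs) — then the offsets coincide — or it was
    -- partial/empty — then nothing remains and hpos is contradictory
    have hEq : (msg.length : Int) + (mI.toNat : Int) + (k : Int) * bs =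
        (msg.length : Int) + (((k + 1 : Nat) : Int)) * bs := by
      have h1 : (((k + 1 : Nat) : Int)) * bs = (k : Int) * bs + bs := by push_cast; ring
      rw [h1]
      rcases min_choice bs (ml - (msg.length : Int)) with h | h
      · rw [← hmI] at h; omega
      · rw [← hmI] at h; omega
    rw [hEq] at hpos ⊢
    exact hH hpos

-- ===== VERDICT (by name: the statement is the Claim_ definition above) =====
theorem get_text_from_blocks_spec : Claim_equal_get_text_from_blocks := by
  intro block_ints ml bs _ hpre
  unfold Spec_get_text_from_blocks get_text_from_blocks get_text_from_blocks_alt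
  congr 1
  apply pvOuter
  intro k hk hpos
  have := hpre k hk
  simp only [List.length_nil, Nat.cast_zero, zero_add] at hpos ⊢
  exact this hpos
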